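-- pv_equiv track=rewrite | github.com/whitelightning450/wordle_analyst_ideas | word_matcher.py | remaining_repeated
-- ===== SOURCE A (Python) =====
-- def remaining_repeated(wordlist, repeated_letters=None):
--     if repeated_letters:
--         d = {}
--         for l in repeated_letters:
--             d[l] = {w for w in wordlist if (letter_count(w, l) <= repeated_letters[l])}
--         # TODO -- this has to be super inefficient to loop through the iterators twice
--         # TODO -- not only that, but we'll do this calculation lots of extra times across
--         # the game.
--         # Start somewhere
--         r = d[l]
--         for l in repeated_letters:
--             r = r.intersection(d[l])
--         return r
--     else:
--         return wordlist
--
-- def letter_count(word=None, letter=None):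
--     """Return the number of times a particular letter shows up in a string.
--     Found this on https://www.geeksforgeeks.org/python-count-occurrences-of-a-character-in-string/
--     """
--     # TODO: This count could be a property of the wordlist -- each word could have an associated
--     # count dictionary that would very quickly be compared to the repeated letter filter.
--     if word and letter:
--         # using lambda + sum() + map() to get count
--         # counting e
--         return sum(map(lambda x: 1 if letter.lower() in x else 0, word.lower()))
--     else:
--         return 0
-- ===== SOURCE B (Python) =====
-- def letter_count(word=None, letter=None):
--     """Return the number of times a particular letter shows up in a string.
--     Found this on https://www.geeksforgeeks.org/python-count-occurrences-of-a-character-in-string/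
--     """
--     if word and letter:
--         return sum(map(lambda x: 1 if letter.lower() in x else 0, word.lower()))
--     else:
--         return 0
--
--
-- def remaining_repeated(wordlist, repeated_letters=None):
--     if not repeated_letters:
--         return wordlist
--     return {w for w in wordlist
--             if all(letter_count(w, l) <= c for l, c in repeated_letters.items())}
-- ===== Notes on version B (the rewrite author's own statement) =====
-- stated objective: simpler
-- what changed: A builds one filtered set per bounded letter in a dict and then intersects them all (scanning the wordlist once per letter and the sets again); B does a single filtering pass that keeps a word iff it satisfies every bound, reusing letter_count unchanged.
import Mathlib
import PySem

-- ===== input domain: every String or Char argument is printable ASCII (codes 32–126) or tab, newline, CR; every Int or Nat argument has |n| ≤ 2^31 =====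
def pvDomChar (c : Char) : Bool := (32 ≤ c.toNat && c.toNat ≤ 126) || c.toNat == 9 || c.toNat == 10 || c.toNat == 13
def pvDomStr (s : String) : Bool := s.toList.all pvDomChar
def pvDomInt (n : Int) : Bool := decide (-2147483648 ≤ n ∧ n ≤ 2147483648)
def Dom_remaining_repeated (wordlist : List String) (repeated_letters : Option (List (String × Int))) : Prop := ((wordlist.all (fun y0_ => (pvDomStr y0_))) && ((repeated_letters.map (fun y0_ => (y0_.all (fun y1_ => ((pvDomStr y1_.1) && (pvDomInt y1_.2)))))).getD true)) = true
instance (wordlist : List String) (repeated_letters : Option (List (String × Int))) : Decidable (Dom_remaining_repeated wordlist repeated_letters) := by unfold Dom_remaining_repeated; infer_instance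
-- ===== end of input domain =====

-- B changes the algorithm (one filtering pass instead of per-letter sets plus intersection); same results, objective: simpler.

-- ===== PORT A =====
-- shared module helper letter_count (Source B reuses it verbatim, so both ports call it)
def letter_count (word : String) (letter : String) : Int :=
  if word ≠ "" ∧ letter ≠ "" then
    ((PySem.Str.lower word).toList.map
      (fun x => if PySem.Chars.isIn (PySem.Str.lower letter).toList [x] then (1 : Int) else 0)).sum
  else 0

-- the dict argument arrives as an association list; 'PySem.Dict.ofList' is dict(pairs)
def remaining_repeated (wordlist : List String) (repeated_letters : Option (List (String × Int))) : List String :=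
  match repeated_letters with
  | some pairs =>
    match (PySem.Dict.ofList pairs).keys with
    | [] => wordlist            -- empty dict is falsy: return wordlist
    | k :: ks =>
      -- d[l] = {w for w in wordlist if letter_count(w, l) <= repeated_letters[l]}
      let d := (k :: ks).foldl
        (fun d l => d.insert l (PySem.Set.ofList (wordlist.filter
          (fun w => letter_count w l ≤ (PySem.Dict.ofList pairs).getD l 0))))
        PySem.Dict.empty
      -- r = d[l] (l is the leftover last key); for l in repeated_letters: r = r.intersection(d[l])
      (k :: ks).foldl (fun r l => PySem.Set.inter r (d.getD l []))
        (d.getD ((k :: ks).getLast (by simp)) [])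
  | none => wordlist

-- ===== PORT B =====
def remaining_repeated_alt (wordlist : List String) (repeated_letters : Option (List (String × Int))) : List String :=
  match repeated_letters with
  | some pairs =>
    if (PySem.Dict.ofList pairs).size = 0 then wordlist
    else
      PySem.Set.ofList (wordlist.filter (fun w =>
        (PySem.Dict.ofList pairs).items.all (fun lc => letter_count w lc.1 ≤ lc.2)))
  | none => wordlist

-- ===== PRECONDITION & SPEC =====
def Spec_remaining_repeated (wordlist : List String) (repeated_letters : Option (List (String × Int))) (out : List String) : Prop := out = remaining_repeated_alt wordlist repeated_letters
instance (wordlist : List String) (repeated_letters : Option (List (String × Int))) (out : List String) : Decidable (Spec_remaining_repeated wordlist repeated_letters out) := by unfold Spec_remaining_repeated; infer_instance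

-- ===== CLAIM (what is proved, stated in full; the proofs are below) =====
def Claim_equal_remaining_repeated : Prop := ∀ (wordlist : List String) (repeated_letters : Option (List (String × Int))), Dom_remaining_repeated wordlist repeated_letters → Spec_remaining_repeated wordlist repeated_letters (remaining_repeated wordlist repeated_letters)

-- ===== LEMMAS AND PROOFS =====

-- a fold of inserts whose value depends only on the key: unseen keys unchanged
theorem pv_get?_foldl_insert_not_mem {κ ν : Type} [BEq κ] [LawfulBEq κ] (F : κ → ν)
    (ks : List κ) (d : PySem.Dict κ ν) (k : κ) (h : k ∉ ks) :
    (ks.foldl (fun d l => d.insert l (F l)) d).get? k = d.get? k := by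
  induction ks generalizing d with
  | nil => rfl
  | cons a t ih =>
    have hka : k ≠ a := fun he => h (by simp [he])
    simp only [List.foldl_cons]
    rw [ih _ (fun hm => h (List.mem_cons_of_mem a hm)),
        PySem.Dict.get?_insert_of_ne d (F a) hka]

-- …and a key that was inserted holds its value
theorem pv_get?_foldl_insert_mem {κ ν : Type} [BEq κ] [LawfulBEq κ] (F : κ → ν)
    (ks : List κ) (d : PySem.Dict κ ν) (k : κ) (h : k ∈ ks) :
    (ks.foldl (fun d l => d.insert l (F l)) d).get? k = some (F k) := by
  induction ks generalizing d with
  | nil => cases h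
  | cons a t ih =>
    simp only [List.foldl_cons]
    by_cases hm : k ∈ t
    · exact ih _ hm
    · have hk : k = a := by rcases List.mem_cons.mp h with h' | h'; exact h'; exact absurd h' hm
      subst hk
      rw [pv_get?_foldl_insert_not_mem _ _ _ _ hm, PySem.Dict.get?_insert_self]

-- Bool congruence for List.all
theorem pv_all_congr {α : Type} (l : List α) (p q : α → Bool) (h : ∀ a ∈ l, p a = q a) :
    l.all p = l.all q := by
  induction l with
  | nil => rfl
  | cons a t ih =>
    simp only [List.all_cons, h a List.mem_cons_self,
      ih (fun b hb => h b (List.mem_cons_of_mem a hb))]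

-- a fold of intersections is one filter by membership in every set
theorem pv_foldl_inter {α κ : Type} [BEq α] (S : κ → PySem.Set α)
    (ks : List κ) (r : PySem.Set α) :
    ks.foldl (fun r l => PySem.Set.inter r (S l)) r
      = r.filter (fun w => ks.all (fun l => (S l).contains w)) := by
  induction ks generalizing r with
  | nil => simp
  | cons a t ih =>
    rw [List.foldl_cons, ih]
    simp only [PySem.Set.inter, List.filter_filter, List.all_cons]
    exact List.filter_congr (fun w _ => Bool.and_comm _ _)

-- List.filter commutes with Set.add
theorem pv_filter_add {α : Type} [BEq α] [LawfulBEq α] (p : α → Bool) (s : PySem.Set α) (x : α) :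
    (PySem.Set.add s x).filter p = if p x then PySem.Set.add (s.filter p) x else s.filter p := by
  by_cases hp : p x = true
  · by_cases hc : x ∈ s <;> simp [PySem.Set.add, List.filter_append, hp, hc]
  · have hpf : p x = false := Bool.eq_false_iff.mpr hp
    by_cases hc : x ∈ s <;> simp [PySem.Set.add, List.filter_append, hpf, hc]

-- set(…) commutes with filtering
theorem pv_ofList_filter {α : Type} [BEq α] [LawfulBEq α] (p : α → Bool) (xs : List α) :
    (PySem.Set.ofList xs).filter p = PySem.Set.ofList (xs.filter p) := by
  suffices h : ∀ s : PySem.Set α,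
      (xs.foldl PySem.Set.add s).filter p = (xs.filter p).foldl PySem.Set.add (s.filter p) by
    exact h PySem.Set.empty
  induction xs with
  | nil => intro s; rfl
  | cons a t ih =>
    intro s
    simp only [List.foldl_cons, List.filter_cons]
    rw [ih, pv_filter_add]
    by_cases hp : p a = true <;> simp [hp]

-- ===== VERDICT (by name: the statement is the Claim_ definition above) =====
theorem remaining_repeated_spec : Claim_equal_remaining_repeated := by
  intro wordlist rl _
  unfold Spec_remaining_repeated
  cases rl with
  | none => rfl
  | some pairs =>
    simp only [remaining_repeated, remaining_repeated_alt]
    split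
    case _ heq =>
      -- keys = []: the dict is empty, B's size test also yields wordlist
      have hsz : (PySem.Dict.ofList pairs).size = 0 := by
        have : (PySem.Dict.ofList pairs).items = [] := by
          have := heq
          simp only [PySem.Dict.keys, List.map_eq_nil_iff] at this
          exact this
        simp [PySem.Dict.size, this]
      rw [if_pos hsz]
    case _ k ks heq =>
      set d0 := PySem.Dict.ofList pairs with hd0
      set F : String → PySem.Set String :=
        fun l => PySem.Set.ofList (List.filter (fun w => decide (letter_count w l ≤ d0.getD l 0)) wordlist)
        with hF
      -- the per-letter dict holds exactly the filtered sets
      have hD : ∀ l ∈ k :: ks,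
          (List.foldl (fun d l => d.insert l (F l)) PySem.Dict.empty (k :: ks)).getD l [] = F l := by
        intro l hl
        rw [PySem.Dict.getD, pv_get?_foldl_insert_mem F _ _ _ hl]
        rfl
      -- membership in a filtered set, for words of the wordlist
      have hcont : ∀ (l : String) (w : String), w ∈ wordlist →
          ((F l).contains w) = decide (letter_count w l ≤ d0.getD l 0) := by
        intro l w hw
        by_cases hP : letter_count w l ≤ d0.getD l 0
        · have hm : w ∈ F l := (PySem.Set.mem_ofList _ _).mpr (List.mem_filter.mpr ⟨hw, by simpa using hP⟩)
          simp [PySem.Set.contains, hm, hP]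
        · have hm : w ∉ F l := fun hm =>
            hP (by simpa using (List.mem_filter.mp ((PySem.Set.mem_ofList _ _).mp hm)).2)
          simp [PySem.Set.contains, hm, hP]
      -- the bound of every key, read back from the items
      have hQ : ∀ w : String,
          ((k :: ks).all (fun l => decide (letter_count w l ≤ d0.getD l 0)))
            = d0.items.all (fun lc => decide (letter_count w lc.1 ≤ lc.2)) := by
        intro w
        rw [← heq]
        simp only [PySem.Dict.keys, List.all_map]
        refine pv_all_congr _ _ _ (fun lc hlc => ?_)
        have hg : d0.get? lc.1 = some lc.2 :=
          PySem.Dict.get?_of_mem_items d0 (by simpa using hlc) (hd0 ▸ PySem.Dict.nodup_keys_ofList pairs)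
        simp [PySem.Dict.getD, hg]
      rw [pv_foldl_inter, hD _ (List.getLast_mem (by simp)),
          List.filter_congr (fun w hw =>
            pv_all_congr _ _ _ (fun l hl => by
              rw [hD l hl,
                  hcont l w (List.mem_filter.mp ((PySem.Set.mem_ofList _ _).mp (hF ▸ hw))).1]))]
      have hsz : ¬ d0.size = 0 := by
        have : d0.items ≠ [] := by
          intro hnil
          rw [PySem.Dict.keys, hnil] at heq
          cases heq
        simp [PySem.Dict.size, this]
      rw [if_neg hsz, hF]
      simp only []
      rw [pv_ofList_filter, List.filter_filter]
      refine congrArg _ (List.filter_congr (fun w hw => ?_))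
      rw [← hQ w]
      by_cases hq : ((k :: ks).all (fun l => decide (letter_count w l ≤ d0.getD l 0))) = true
      · have hlast := List.all_eq_true.mp hq _ (List.getLast_mem (l := k :: ks) (by simp))
        simp [hq, hlast]
      · simp [Bool.eq_false_iff.mpr hq]
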